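-- pv_equiv track=rewrite | github.com/Nmdk1/StrideIQ | apps/api/services/intelligence/finding_eligibility.py | is_signal_suppressed
-- ===== SOURCE A (Python) =====
-- PASSIVE_NOISE_SIGNALS: frozenset = frozenset(
--     {
--         "active_kcal",
--         "daily_active_kcal",
--         "garmin_active_kcal",
--         "garmin_steps",
--         "daily_step_count",
--         "garmin_active_time_s",
--         "garmin_body_battery_end",
--         "garmin_avg_stress",
--         "garmin_max_stress",
--         "garmin_aerobic_te",
--         "garmin_anaerobic_te",
--         "garmin_body_battery_impact",
--     }
-- )
--
-- ENVIRONMENT_SIGNALS: frozenset = frozenset(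
--     {
--         "dew_point_f",
--         "temperature_f",
--         "humidity_pct",
--         "heat_adjustment_pct",
--     }
-- )
--
-- SUPPRESSED_INTERACTION_SIGNALS: frozenset = frozenset(
--     {
--         "heat_stress_index",
--     }
-- )
--
-- def is_signal_suppressed(input_name: str) -> bool:
--     """True if ``input_name`` should never reach an athlete-facing surface.
--
--     Derived signals and interaction terms inherit suppression from their
--     parent signals. The engine still computes them — suppression is a
--     display-time decision, not a computation-time decision.
--     """
--     if input_name in PASSIVE_NOISE_SIGNALS or input_name in ENVIRONMENT_SIGNALS:
--         return True
--     if input_name in SUPPRESSED_INTERACTION_SIGNALS: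
--         return True
--     for parent in PASSIVE_NOISE_SIGNALS | ENVIRONMENT_SIGNALS:
--         if input_name.startswith(parent + "_"):
--             return True
--     return False
-- ===== SOURCE B (Python) =====
-- PASSIVE_NOISE_SIGNALS: frozenset = frozenset(
--     {
--         "active_kcal",
--         "daily_active_kcal",
--         "garmin_active_kcal",
--         "garmin_steps",
--         "daily_step_count",
--         "garmin_active_time_s",
--         "garmin_body_battery_end",
--         "garmin_avg_stress",
--         "garmin_max_stress",
--         "garmin_aerobic_te",
--         "garmin_anaerobic_te",
--         "garmin_body_battery_impact",
--     }
-- )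
--
-- ENVIRONMENT_SIGNALS: frozenset = frozenset(
--     {
--         "dew_point_f",
--         "temperature_f",
--         "humidity_pct",
--         "heat_adjustment_pct",
--     }
-- )
--
-- SUPPRESSED_INTERACTION_SIGNALS: frozenset = frozenset(
--     {
--         "heat_stress_index",
--     }
-- )
--
-- _PARENTS = PASSIVE_NOISE_SIGNALS | ENVIRONMENT_SIGNALS
--
--
-- def is_signal_suppressed(input_name: str) -> bool:
--     if (input_name in PASSIVE_NOISE_SIGNALS
--             or input_name in ENVIRONMENT_SIGNALS
--             or input_name in SUPPRESSED_INTERACTION_SIGNALS):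
--         return True
--     # Walk the input once: at each underscore, test whether the part before
--     # it is a suppressed parent signal (set lookup instead of scanning the
--     # parent set with startswith).
--     prefix = ""
--     for ch in input_name:
--         if ch == "_" and prefix in _PARENTS:
--             return True
--         prefix += ch
--     return False
-- ===== Notes on version B (the rewrite author's own statement) =====
-- stated objective: alternative
-- what changed: Instead of scanning the 16-element parent set and testing each parent-plus-separator as a prefix of the input, B walks the input string once and, at every underscore, looks the preceding prefix up in the parent set.
import Mathlib
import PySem

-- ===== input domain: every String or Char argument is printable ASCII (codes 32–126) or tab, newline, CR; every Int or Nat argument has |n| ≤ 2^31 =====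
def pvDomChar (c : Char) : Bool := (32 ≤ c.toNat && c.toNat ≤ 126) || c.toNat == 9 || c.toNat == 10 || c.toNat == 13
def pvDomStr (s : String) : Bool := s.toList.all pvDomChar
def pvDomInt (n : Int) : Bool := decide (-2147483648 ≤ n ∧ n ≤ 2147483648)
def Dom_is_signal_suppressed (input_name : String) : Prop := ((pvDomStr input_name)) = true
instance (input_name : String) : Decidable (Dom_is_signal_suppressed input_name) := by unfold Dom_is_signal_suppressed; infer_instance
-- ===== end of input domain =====

-- B replaces A's scan over the fixed parent set with startswith tests by a single
-- left-to-right walk of the input that looks each underscore-delimited prefix up in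
-- the parent set (objective: alternative; same observable result).

-- ===== PORT A =====
-- the three module-level frozensets, as lists of their distinct elements
def pvPassive : List String :=
  ["active_kcal", "daily_active_kcal", "garmin_active_kcal", "garmin_steps",
   "daily_step_count", "garmin_active_time_s", "garmin_body_battery_end",
   "garmin_avg_stress", "garmin_max_stress", "garmin_aerobic_te",
   "garmin_anaerobic_te", "garmin_body_battery_impact"]

def pvEnv : List String :=
  ["dew_point_f", "temperature_f", "humidity_pct", "heat_adjustment_pct"]

def pvSuppInt : List String := ["heat_stress_index"]

def is_signal_suppressed (input_name : String) : Bool :=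
  if pvPassive.contains input_name || pvEnv.contains input_name then true
  else if pvSuppInt.contains input_name then true
  else (pvPassive ++ pvEnv).any
    (fun parent => PySem.Str.startswith input_name (parent ++ "_"))

-- ===== PORT B =====
-- PASSIVE | ENVIRONMENT, as character lists (B compares string prefixes)
def pvParentChars : List (List Char) := (pvPassive ++ pvEnv).map String.toList

-- the `for ch in input_name` loop of Source B: `pre` is the prefix accumulated so far
def pvScan : List Char → List Char → Bool
  | _, [] => false
  | pre, c :: rest =>
      if c == '_' && pvParentChars.contains pre then true
      else pvScan (pre ++ [c]) rest

def is_signal_suppressed_alt (input_name : String) : Bool :=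
  if pvPassive.contains input_name || pvEnv.contains input_name
      || pvSuppInt.contains input_name then true
  else pvScan [] input_name.toList

-- ===== PRECONDITION & SPEC =====
def Spec_is_signal_suppressed (input_name : String) (out : Bool) : Prop := out = is_signal_suppressed_alt input_name
instance (input_name : String) (out : Bool) : Decidable (Spec_is_signal_suppressed input_name out) := by unfold Spec_is_signal_suppressed; infer_instance

-- ===== CLAIM (what is proved, stated in full; the proofs are below) =====
def Claim_equal_is_signal_suppressed : Prop := ∀ (input_name : String), Dom_is_signal_suppressed input_name → Spec_is_signal_suppressed input_name (is_signal_suppressed input_name)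

-- ===== LEMMAS AND PROOFS =====

-- any over a list is determined by the predicate's values on its members
lemma pvAnyCongr {α : Type} (l : List α) (p q : α → Bool)
    (h : ∀ x ∈ l, p x = q x) : l.any p = l.any q := by
  induction l with
  | nil => rfl
  | cons a t ih =>
      rw [List.any_cons, List.any_cons, h a (by simp),
        ih (fun x hx => h x (List.mem_cons_of_mem a hx))]

-- pointwise step of the scan invariant, under the failed guard
lemma pvStep_eq (c : Char) (rest pre p : List Char)
    (h : ¬(c = '_' ∧ pre ∈ pvParentChars)) (hp : p ∈ pvParentChars) :
    (pre.isPrefixOf p && ((p.drop pre.length) ++ ['_']).isPrefixOf (c :: rest))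
      = ((pre ++ [c]).isPrefixOf p && ((p.drop (pre.length + 1)) ++ ['_']).isPrefixOf rest) := by
  rw [Bool.eq_iff_iff]
  simp only [Bool.and_eq_true, List.isPrefixOf_iff_prefix]
  by_cases hpre : pre <+: p
  · obtain ⟨q, rfl⟩ := hpre
    cases q with
    | nil =>
        simp only [List.append_nil] at hp ⊢
        simp only [List.drop_length, List.nil_append, List.cons_prefix_cons]
        constructor
        · rintro ⟨-, hc, -⟩
          exact absurd ⟨hc.symm, hp⟩ h
        · rintro ⟨hp1, -⟩
          have := hp1.length_le
          simp at this
    | cons d q' =>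
        have hd : (pre ++ d :: q').drop pre.length = d :: q' := List.drop_left
        have hd' : (pre ++ d :: q').drop (pre.length + 1) = q' := by
          rw [show pre ++ d :: q' = (pre ++ [d]) ++ q' by simp,
              show pre.length + 1 = (pre ++ [d]).length by simp]
          exact List.drop_left
        rw [hd, hd', List.cons_append, List.cons_prefix_cons,
          show pre ++ d :: q' = pre ++ ([c] ++ (d :: q')).tail by simp]
        -- the rewrite above is only to keep shapes aligned; simplify both sides
        simp only [List.cons_append, List.nil_append, List.tail_cons]
        constructor
        · rintro ⟨-, rfl, h2⟩
          exact ⟨(List.prefix_append_right_inj pre).mpr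
            (List.cons_prefix_cons.mpr ⟨rfl, List.nil_prefix⟩), h2⟩
        · rintro ⟨h1, h2⟩
          have hcd : c = d :=
            (List.cons_prefix_cons.mp ((List.prefix_append_right_inj pre).mp h1)).1
          exact ⟨List.prefix_append pre (d :: q'), hcd.symm, h2⟩
  · constructor
    · rintro ⟨hp1, -⟩; exact absurd hp1 hpre
    · rintro ⟨hp1, -⟩
      exact absurd ((pre.prefix_append [c]).trans hp1) hpre

-- scan invariant: pvScan pre l tests, for each parent p, whether p extends pre and
-- the remainder of p followed by '_' is a prefix of l
lemma pvScan_eq (l : List Char) : ∀ pre : List Char,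
    pvScan pre l = pvParentChars.any
      (fun p => pre.isPrefixOf p && ((p.drop pre.length) ++ ['_']).isPrefixOf l) := by
  induction l with
  | nil =>
      intro pre
      simp only [pvScan]
      symm
      rw [List.any_eq_false]
      intro p _
      simp
  | cons c rest ih =>
      intro pre
      by_cases h : c = '_' ∧ pre ∈ pvParentChars
      · obtain ⟨rfl, hmem⟩ := h
        simp only [pvScan, List.contains_eq_mem, hmem]
        simp only [beq_self_eq_true, decide_true, Bool.and_self, if_true]
        symm
        rw [List.any_eq_true]
        exact ⟨pre, hmem, by
          simp [List.isPrefixOf_iff_prefix, List.drop_length]⟩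
      · have hguard : (c == '_' && pvParentChars.contains pre) = false := by
          rcases not_and_or.mp h with hc | hm
          · simp [hc]
          · simp [List.contains_eq_mem, hm]
        simp only [pvScan, hguard, Bool.false_eq_true, if_false]
        rw [ih (pre ++ [c])]
        simp only [List.length_append, List.length_singleton]
        exact (pvAnyCongr pvParentChars _ _
          (fun p hp => (pvStep_eq c rest pre p h hp))).symm

-- ===== VERDICT (by name: the statement is the Claim_ definition above) =====
theorem is_signal_suppressed_spec : Claim_equal_is_signal_suppressed := by
  intro s _
  unfold Spec_is_signal_suppressed is_signal_suppressed is_signal_suppressed_alt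
  have hmain : ((pvPassive ++ pvEnv).any
      (fun parent => PySem.Str.startswith s (parent ++ "_"))) = pvScan [] s.toList := by
    rw [pvScan_eq s.toList []]
    unfold pvParentChars
    rw [List.any_map]
    exact (pvAnyCongr (pvPassive ++ pvEnv) _ _ (fun parent _ => by
      simp [PySem.Str.startswith_eq, PySem.Chars.startswith, String.toList_append])).symm
  rw [hmain]
  simp [Bool.or_assoc]
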